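-- pv_equiv track=rewrite | github.com/learningequality/video-vectorization | vectorization/defs/defs.py | compute_all_edges
-- ===== SOURCE A (Python) =====
-- import itertools
--
-- def compute_all_edges(data_pts):
--     graph_connections = []
--
--     for current in range(0, len(data_pts)):
--         adjacent = [data_pts.index(_x) for _x in data_pts if
--                     (abs(_x[0] - data_pts[current][0]) < 2) and (abs(_x[1] - data_pts[current][1]) < 2) and
--                     (_x[0] != data_pts[current][0] or _x[1] != data_pts[current][1])]
--         for _a in adjacent:
--             graph_connections.append((current, _a))
--             # print "connection: " + str(current) + " : " + str(_a)
--
--     # Remove duplicates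
--     list_with_duplicates = sorted([sorted(_x) for _x in graph_connections])
--     result = list(list_with_duplicates for list_with_duplicates, _ in itertools.groupby(list_with_duplicates))
--     # print result
--     return result
-- ===== SOURCE B (Python) =====
-- def compute_all_edges(data_pts):
--     # One pass: bucket the FIRST index of each distinct point value by its (x, y) cell.
--     cells = {}
--     seen = set()
--     for i, p in enumerate(data_pts):
--         t = tuple(p)
--         if t not in seen:
--             seen.add(t)
--             cells.setdefault((p[0], p[1]), []).append(i)
--     # Neighbors of p are exactly the points in the 8 surrounding unit cells.
--     edges = set()
--     for i, p in enumerate(data_pts):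
--         x, y = p[0], p[1]
--         for dx in (-1, 0, 1):
--             for dy in (-1, 0, 1):
--                 if dx != 0 or dy != 0:
--                     for j in cells.get((x + dx, y + dy), ()):
--                         edges.add((i, j) if i < j else (j, i))
--     return [list(e) for e in sorted(edges)]
-- ===== Notes on version B (the rewrite author's own statement) =====
-- stated objective: faster
-- what changed: A rescans the whole list per point (list comprehension with a nested list.index per hit) and then sorts with groupby dedup; B makes one pass building a grid dict that buckets the first index of each distinct point value by its (x,y) cell, collects each point's neighbors from the 8 surrounding unit cells into a set of normalized edges, and sorts that set.
import Mathlib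
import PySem

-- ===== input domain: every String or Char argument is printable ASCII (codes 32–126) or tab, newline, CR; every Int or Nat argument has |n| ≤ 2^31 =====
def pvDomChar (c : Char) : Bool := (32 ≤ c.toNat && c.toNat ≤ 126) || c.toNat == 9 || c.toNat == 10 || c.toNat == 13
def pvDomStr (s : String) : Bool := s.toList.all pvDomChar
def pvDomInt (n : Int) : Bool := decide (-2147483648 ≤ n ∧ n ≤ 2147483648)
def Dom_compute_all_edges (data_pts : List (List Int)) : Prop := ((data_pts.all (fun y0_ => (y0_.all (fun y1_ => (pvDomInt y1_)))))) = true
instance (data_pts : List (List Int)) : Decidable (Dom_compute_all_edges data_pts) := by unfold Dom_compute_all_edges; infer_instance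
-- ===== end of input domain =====

-- B replaces A's cubic all-pairs/index scan by one grid-bucket dict of first indices plus a set of
-- normalized edges; measured faster (asymptotically fewer scans). Equivalence is about return values.

-- ===== PORT A =====
-- p[0] / p[1]; Pre_ keeps indices in range, so the defaults are never returned to the caller
def pvFst (p : List Int) : Int := PySem.List.pyGetD p 0 0
def pvSnd (p : List Int) : Int := PySem.List.pyGetD p 1 0
-- the comprehension's filter condition
def pvNear (cur x : List Int) : Bool :=
  decide (|pvFst x - pvFst cur| < 2) && decide (|pvSnd x - pvSnd cur| < 2) &&
  (decide (pvFst x ≠ pvFst cur) || decide (pvSnd x ≠ pvSnd cur))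
-- data_pts.index(x): x is always a member, so the default is never used
def pvIdx (pts : List (List Int)) (q : List Int) : Int := ((PySem.List.index? pts q).getD 0 : Int)
-- Python's sorted on lists of ints (lexicographic order of Python = lex linear order on List Int)
def pvSortedLL (xs : List (List Int)) : List (List Int) :=
  @PySem.List.sorted (List Int) (List Int) List.instLinearOrder.toLT LinearOrder.toDecidableLT
    xs (fun y => y) false
-- keys of itertools.groupby on the sorted list = drop adjacent duplicates
def pvUniqAdj {α : Type} [DecidableEq α] : List α → List α
  | [] => []
  | [x] => [x]
  | x :: y :: t => if x = y then pvUniqAdj (y :: t) else x :: pvUniqAdj (y :: t)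

def compute_all_edges (data_pts : List (List Int)) : List (List Int) :=
  let graph_connections : List (Int × Int) :=
    (PySem.List.pyRange 0 data_pts.length 1).foldl (fun acc current =>
      let cur := PySem.List.pyGetD data_pts current []
      let adjacent : List Int :=
        (data_pts.filter (fun x => pvNear cur x)).map (fun x => pvIdx data_pts x)
      acc ++ adjacent.map (fun a => (current, a))) []
  let list_with_duplicates : List (List Int) :=
    pvSortedLL (graph_connections.map (fun p => PySem.List.sorted [p.1, p.2] (fun y => y) false))
  pvUniqAdj list_with_duplicates

-- ===== PORT B =====
-- internal (i, j)/(x, y) tuples of Source B are represented as their final 2-element lists / pairs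
def pvCellKey (p : List Int) : Int × Int := (pvFst p, pvSnd p)
-- one enumerate pass: 'if t not in seen: seen.add(t); cells.setdefault(cell, []).append(i)'
def pvCellStep (st : PySem.Dict (Int × Int) (List Int) × PySem.Set (List Int))
    (ip : Int × List Int) : PySem.Dict (Int × Int) (List Int) × PySem.Set (List Int) :=
  if PySem.Set.contains st.2 ip.2 then st
  else (st.1.modify (pvCellKey ip.2) [] (· ++ [ip.1]), PySem.Set.add st.2 ip.2)
def pvCellFold (pts : List (List Int)) :
    PySem.Dict (Int × Int) (List Int) × PySem.Set (List Int) :=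
  (PySem.List.enumerate pts 0).foldl pvCellStep (PySem.Dict.empty, PySem.Set.empty)

def compute_all_edges_alt (data_pts : List (List Int)) : List (List Int) :=
  let cells := (pvCellFold data_pts).1
  let edges : PySem.Set (List Int) :=
    (PySem.List.enumerate data_pts 0).foldl (fun es ip =>
      [(-1 : Int), 0, 1].foldl (fun es dx =>
        [(-1 : Int), 0, 1].foldl (fun es dy =>
          if dx ≠ 0 ∨ dy ≠ 0 then
            (cells.getD (pvFst ip.2 + dx, pvSnd ip.2 + dy) []).foldl
              (fun es j => PySem.Set.add es (if ip.1 < j then [ip.1, j] else [j, ip.1])) es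
          else es) es) es) PySem.Set.empty
  pvSortedLL edges

-- ===== PRECONDITION & SPEC =====
-- Python A raises IndexError (x[1] when current reaches a short point) iff some point has < 2
-- coordinates; B raises there too. Pre_ excludes exactly those inputs.
def Pre_compute_all_edges (data_pts : List (List Int)) : Prop := ∀ p ∈ data_pts, 2 ≤ p.length
instance (data_pts : List (List Int)) : Decidable (Pre_compute_all_edges data_pts) := by
  unfold Pre_compute_all_edges; infer_instance
def pvWitness_compute_all_edges : List (List Int) := [[0, 0], [1, 1], [5, 5]]

def Spec_compute_all_edges (data_pts : List (List Int)) (out : List (List Int)) : Prop := out = compute_all_edges_alt data_pts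
instance (data_pts : List (List Int)) (out : List (List Int)) : Decidable (Spec_compute_all_edges data_pts out) := by unfold Spec_compute_all_edges; infer_instance

-- ===== CLAIM (what is proved, stated in full; the proofs are below) =====
def Claim_equal_compute_all_edges : Prop := ∀ (data_pts : List (List Int)), Dom_compute_all_edges data_pts → Pre_compute_all_edges data_pts → Spec_compute_all_edges data_pts (compute_all_edges data_pts)

-- ===== LEMMAS AND PROOFS =====

-- membership through a fold that only grows a list
lemma pv_mem_foldl {β γ : Type} (g : List γ → β → List γ) (Q : β → γ → Prop)
    (hg : ∀ s b x, x ∈ g s b ↔ x ∈ s ∨ Q b x) :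
    ∀ (l : List β) (s : List γ) (x : γ), x ∈ l.foldl g s ↔ x ∈ s ∨ ∃ b ∈ l, Q b x := by
  intro l
  induction l with
  | nil => simp
  | cons b l ih => intro s x; rw [List.foldl_cons, ih, hg]; simp; tauto

-- Nodup survives a fold whose step preserves it
lemma pv_nodup_foldl {β γ : Type} (g : List γ → β → List γ)
    (hg : ∀ s b, s.Nodup → (g s b).Nodup) :
    ∀ (l : List β) (s : List γ), s.Nodup → (l.foldl g s).Nodup := by
  intro l
  induction l with
  | nil => simp
  | cons b l ih => intro s h; exact ih _ (hg _ _ h)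

-- two strictly increasing lists with the same members are equal
lemma pv_eq_of_pairwise_lt {α : Type} [LinearOrder α] (l1 l2 : List α)
    (h1 : l1.Pairwise (· < ·)) (h2 : l2.Pairwise (· < ·))
    (hm : ∀ x, x ∈ l1 ↔ x ∈ l2) : l1 = l2 := by
  have n1 : l1.Nodup := h1.imp ne_of_lt
  have n2 : l2.Nodup := h2.imp ne_of_lt
  exact ((List.perm_ext_iff_of_nodup n1 n2).mpr hm).eq_of_pairwise
    (fun a b _ _ hab hba => absurd hba (lt_asymm hab)) h1 h2

lemma pv_uniqAdj_mem {α : Type} [DecidableEq α] (l : List α) (x : α) :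
    x ∈ pvUniqAdj l ↔ x ∈ l := by
  induction l with
  | nil => simp [pvUniqAdj]
  | cons a t ih =>
    cases t with
    | nil => simp [pvUniqAdj]
    | cons b t2 =>
      by_cases h : a = b
      · subst h; simp [pvUniqAdj, ih]
      · simp only [pvUniqAdj, if_neg h, List.mem_cons, ih]

lemma pv_uniqAdj_pairwise {α : Type} [DecidableEq α] [LinearOrder α]
    (l : List α) (h : l.Pairwise (· ≤ ·)) : (pvUniqAdj l).Pairwise (· < ·) := by
  induction l with
  | nil => simp [pvUniqAdj]
  | cons a t ih =>
    cases t with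
    | nil => simp [pvUniqAdj]
    | cons b t2 =>
      rcases List.pairwise_cons.mp h with ⟨ha, ht⟩
      by_cases hab : a = b
      · subst hab; simpa [pvUniqAdj] using ih ht
      · simp only [pvUniqAdj, if_neg hab, List.pairwise_cons]
        refine ⟨?_, ih ht⟩
        intro z hz
        have hzmem : z ∈ b :: t2 := by
          have := pv_uniqAdj_mem (b :: t2) z; tauto
        have hab' : a < b := lt_of_le_of_ne (ha b (by simp)) hab
        rcases List.mem_cons.mp hzmem with rfl | hz2
        · exact hab'
        · exact lt_of_lt_of_le hab' ((List.pairwise_cons.mp ht).1 z hz2)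

-- Python sorted((c, a)) as a closed form
lemma pv_sorted_pair (a b : Int) :
    PySem.List.sorted [a, b] (fun y => y) false = if b < a then [b, a] else [a, b] := by
  by_cases h : b < a <;> simp [PySem.List.sorted, PySem.List.insertBy, h]

-- the two normalizations of an edge coincide
def pvNorm (i j : Int) : List Int := if j < i then [j, i] else [i, j]

lemma pv_norm_eq (i j : Int) : (if i < j then [i, j] else [j, i]) = pvNorm i j := by
  unfold pvNorm
  rcases lt_trichotomy i j with h | h | h
  · rw [if_pos h, if_neg (by omega)]
  · subst h; simp
  · rw [if_neg (by omega), if_pos h]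

lemma pv_idx_append (pre t : List (List Int)) (r : List Int) (hr : r ∈ pre) :
    pvIdx (pre ++ t) r = pvIdx pre r := by
  unfold pvIdx; rw [PySem.List.index?_append_of_mem t hr]

lemma pv_idx_snoc_self (pre : List (List Int)) (q : List Int) (hq : q ∉ pre) :
    pvIdx (pre ++ [q]) q = (pre.length : Int) := by
  unfold pvIdx; rw [PySem.List.index?_append_singleton_self pre q hq]; rfl

lemma pv_cellFold_snoc (pre : List (List Int)) (q : List Int) :
    pvCellFold (pre ++ [q]) = pvCellStep (pvCellFold pre) ((pre.length : Int), q) := by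
  unfold pvCellFold
  rw [PySem.List.enumerate_append, List.foldl_append]
  simp [PySem.List.enumerate]

lemma pv_cell_seen (pts : List (List Int)) : (pvCellFold pts).2 = PySem.Set.ofList pts := by
  induction pts using List.reverseRecOn with
  | nil => rfl
  | append_singleton pre q ih =>
    rw [pv_cellFold_snoc, PySem.Set.ofList_append_singleton, pvCellStep]
    by_cases h : q ∈ (pvCellFold pre).2
    · rw [if_pos (by simpa [PySem.Set.contains_iff] using h), ih,
        PySem.Set.add_of_mem (by rwa [← ih])]
    · rw [if_neg (by simpa [PySem.Set.contains_iff] using h)]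
      simp [ih]

-- the grid dict holds, per cell, exactly the first indices of the point values in that cell
lemma pv_cell_mem (pts : List (List Int)) (u v j : Int) :
    j ∈ (pvCellFold pts).1.getD (u, v) [] ↔
      ∃ q ∈ pts, pvCellKey q = (u, v) ∧ j = pvIdx pts q := by
  induction pts using List.reverseRecOn with
  | nil => simp [pvCellFold, PySem.List.enumerate, PySem.Dict.getD_empty]
  | append_singleton pre q ih =>
    rw [pv_cellFold_snoc, pvCellStep]
    by_cases h : q ∈ (pvCellFold pre).2
    · rw [if_pos (by simpa [PySem.Set.contains_iff] using h)]
      have hqpre : q ∈ pre := by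
        have := pv_cell_seen pre; rw [this, PySem.Set.mem_ofList] at h; exact h
      rw [ih]
      constructor
      · rintro ⟨r, hr, hk, hj⟩
        exact ⟨r, by simp [hr], hk, by rw [pv_idx_append pre [q] r hr]; exact hj⟩
      · rintro ⟨r, hr, hk, hj⟩
        rcases (List.mem_append.mp hr) with hr' | hr'
        · exact ⟨r, hr', hk, by rwa [pv_idx_append pre [q] r hr'] at hj⟩
        · have : r = q := by simpa using hr'
          subst this
          exact ⟨r, hqpre, hk, by rwa [pv_idx_append pre [r] r hqpre] at hj⟩
    · rw [if_neg (by simpa [PySem.Set.contains_iff] using h)]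
      have hqpre : q ∉ pre := by
        have := pv_cell_seen pre; rw [this] at h; simpa [PySem.Set.mem_ofList] using h
      rw [PySem.Dict.getD_modify]
      by_cases hk : (u, v) = pvCellKey q
      · rw [if_pos hk, ← hk]
        simp only [List.mem_append, List.mem_singleton]
        constructor
        · rintro (hj | rfl)
          · rcases ih.mp hj with ⟨r, hr, hrk, hrj⟩
            exact ⟨r, by simp [hr], hrk, by rw [pv_idx_append pre [q] r hr]; exact hrj⟩
          · exact ⟨q, by simp, hk.symm, (pv_idx_snoc_self pre q hqpre).symm⟩
        · rintro ⟨r, hr, hrk, hrj⟩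
          rcases hr with hr' | hr'
          · exact Or.inl (ih.mpr ⟨r, hr', hrk, by rwa [pv_idx_append pre [q] r hr'] at hrj⟩)
          · have : r = q := by simpa using hr'
            subst this
            rw [pv_idx_snoc_self pre r hqpre] at hrj
            exact Or.inr hrj
      · rw [if_neg hk, ih]
        constructor
        · rintro ⟨r, hr, hrk, hrj⟩
          exact ⟨r, by simp [hr], hrk, by rw [pv_idx_append pre [q] r hr]; exact hrj⟩
        · rintro ⟨r, hr, hrk, hrj⟩
          rcases (List.mem_append.mp hr) with hr' | hr'
          · exact ⟨r, hr', hrk, by rwa [pv_idx_append pre [q] r hr'] at hrj⟩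
          · have : r = q := by simpa using hr'
            subst this
            exact absurd hrk.symm (by simpa using hk)

-- membership in A's output
lemma pv_memA (pts : List (List Int)) (x : List Int) :
    x ∈ compute_all_edges pts ↔
      ∃ i : Int, (0 ≤ i ∧ i < (pts.length : Int)) ∧
        ∃ q ∈ pts, pvNear (PySem.List.pyGetD pts i []) q = true ∧ x = pvNorm i (pvIdx pts q) := by
  simp only [compute_all_edges, pvSortedLL]
  rw [pv_uniqAdj_mem, @PySem.List.mem_sorted (List Int) (List Int) List.instLinearOrder.toLT LinearOrder.toDecidableLT]
  rw [PySem.List.foldl_append_eq_flatMap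
    (fun current => ((pts.filter (fun y => pvNear (PySem.List.pyGetD pts current []) y)).map
      (fun y => pvIdx pts y)).map (fun a => (current, a)))]
  simp only [List.nil_append, List.mem_map, List.mem_flatMap, List.mem_filter,
    PySem.List.mem_pyRange_one]
  constructor
  · rintro ⟨p, ⟨i, hi, a, ⟨q, ⟨hq, hnear⟩, rfl⟩, rfl⟩, rfl⟩
    exact ⟨i, hi, q, hq, hnear, (pv_sorted_pair i (pvIdx pts q)).symm ▸ rfl⟩
  · rintro ⟨i, hi, q, hq, hnear, rfl⟩
    refine ⟨(i, pvIdx pts q), ⟨i, hi, pvIdx pts q, ⟨q, ⟨hq, hnear⟩, rfl⟩, rfl⟩, ?_⟩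
    rw [pv_sorted_pair]
    rfl

-- membership in B's edge set
set_option maxHeartbeats 1000000 in
lemma pv_memB (pts : List (List Int)) (x : List Int) :
    x ∈ compute_all_edges_alt pts ↔
      ∃ i : Int, (0 ≤ i ∧ i < (pts.length : Int)) ∧
        ∃ dx ∈ [(-1 : Int), 0, 1], ∃ dy ∈ [(-1 : Int), 0, 1], (dx ≠ 0 ∨ dy ≠ 0) ∧
          ∃ q ∈ pts,
            pvCellKey q = (pvFst (PySem.List.pyGetD pts i []) + dx,
                           pvSnd (PySem.List.pyGetD pts i []) + dy) ∧
            x = pvNorm i (pvIdx pts q) := by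
  simp only [compute_all_edges_alt, pvSortedLL]
  rw [@PySem.List.mem_sorted (List Int) (List Int) List.instLinearOrder.toLT LinearOrder.toDecidableLT]
  have hj : ∀ (i : Int) (L : List Int) (es : List (List Int)) (x : List Int),
      x ∈ L.foldl (fun es j => PySem.Set.add es (if i < j then [i, j] else [j, i])) es ↔
        x ∈ es ∨ ∃ j ∈ L, x = pvNorm i j := by
    intro i L es x
    exact pv_mem_foldl _ (fun j x => x = pvNorm i j)
      (fun s b y => by rw [PySem.Set.mem_add, pv_norm_eq]) L es x
  have hdy : ∀ (ip : Int × List Int) (dx : Int) (es : List (List Int)) (x : List Int),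
      x ∈ [(-1 : Int), 0, 1].foldl (fun es dy =>
          if dx ≠ 0 ∨ dy ≠ 0 then
            (((pvCellFold pts).1.getD (pvFst ip.2 + dx, pvSnd ip.2 + dy) []).foldl
              (fun es j => PySem.Set.add es (if ip.1 < j then [ip.1, j] else [j, ip.1])) es)
          else es) es ↔
        x ∈ es ∨ ∃ dy ∈ [(-1 : Int), 0, 1], (dx ≠ 0 ∨ dy ≠ 0) ∧
          ∃ j ∈ (pvCellFold pts).1.getD (pvFst ip.2 + dx, pvSnd ip.2 + dy) [],
            x = pvNorm ip.1 j := by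
    intro ip dx es x
    refine pv_mem_foldl _
      (fun dy y => (dx ≠ 0 ∨ dy ≠ 0) ∧
        ∃ j ∈ (pvCellFold pts).1.getD (pvFst ip.2 + dx, pvSnd ip.2 + dy) [], y = pvNorm ip.1 j)
      (fun s dy y => ?_) _ es x
    split_ifs with hc
    · rw [hj]; tauto
    · tauto
  have hdx : ∀ (ip : Int × List Int) (es : List (List Int)) (x : List Int),
      x ∈ [(-1 : Int), 0, 1].foldl (fun es dx =>
          [(-1 : Int), 0, 1].foldl (fun es dy =>
            if dx ≠ 0 ∨ dy ≠ 0 then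
              (((pvCellFold pts).1.getD (pvFst ip.2 + dx, pvSnd ip.2 + dy) []).foldl
                (fun es j => PySem.Set.add es (if ip.1 < j then [ip.1, j] else [j, ip.1])) es)
            else es) es) es ↔
        x ∈ es ∨ ∃ dx ∈ [(-1 : Int), 0, 1], ∃ dy ∈ [(-1 : Int), 0, 1], (dx ≠ 0 ∨ dy ≠ 0) ∧
          ∃ j ∈ (pvCellFold pts).1.getD (pvFst ip.2 + dx, pvSnd ip.2 + dy) [],
            x = pvNorm ip.1 j := by
    intro ip es x
    exact pv_mem_foldl _ _ (fun s dx y => hdy ip dx s y) _ es x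
  have houter := pv_mem_foldl
    (fun es (ip : Int × List Int) =>
      [(-1 : Int), 0, 1].foldl (fun es dx =>
        [(-1 : Int), 0, 1].foldl (fun es dy =>
          if dx ≠ 0 ∨ dy ≠ 0 then
            (((pvCellFold pts).1.getD (pvFst ip.2 + dx, pvSnd ip.2 + dy) []).foldl
              (fun es j => PySem.Set.add es (if ip.1 < j then [ip.1, j] else [j, ip.1])) es)
          else es) es) es)
    (fun ip x => ∃ dx ∈ [(-1 : Int), 0, 1], ∃ dy ∈ [(-1 : Int), 0, 1], (dx ≠ 0 ∨ dy ≠ 0) ∧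
        ∃ j ∈ (pvCellFold pts).1.getD (pvFst ip.2 + dx, pvSnd ip.2 + dy) [],
          x = pvNorm ip.1 j)
    (fun s ip y => hdx ip s y)
  rw [houter (PySem.List.enumerate pts 0) PySem.Set.empty x]
  rw [PySem.List.enumerate_eq_map_pyRange pts []]
  simp only [PySem.Set.empty, List.not_mem_nil, false_or, List.mem_map,
    PySem.List.mem_pyRange_one, PySem.List.len_eq]
  constructor
  · rintro ⟨ip, ⟨i, hi, rfl⟩, dx, hdx', dy, hdy', hne, j, hjmem, rfl⟩
    rcases (pv_cell_mem pts _ _ j).mp hjmem with ⟨q, hq, hkey, rfl⟩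
    exact ⟨i, hi, dx, hdx', dy, hdy', hne, q, hq, hkey, rfl⟩
  · rintro ⟨i, hi, dx, hdx', dy, hdy', hne, q, hq, hkey, rfl⟩
    refine ⟨(i, PySem.List.pyGetD pts i []), ⟨i, hi, rfl⟩, dx, hdx', dy, hdy', hne,
      pvIdx pts q, ?_, rfl⟩
    exact (pv_cell_mem pts _ _ _).mpr ⟨q, hq, hkey, rfl⟩

-- near-by-coordinates is exactly membership in one of the 8 neighbouring unit cells
lemma pv_near_iff (c q : List Int) :
    pvNear c q = true ↔
      ∃ dx ∈ [(-1 : Int), 0, 1], ∃ dy ∈ [(-1 : Int), 0, 1], (dx ≠ 0 ∨ dy ≠ 0) ∧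
        pvCellKey q = (pvFst c + dx, pvSnd c + dy) := by
  unfold pvNear pvCellKey
  simp only [Bool.and_eq_true, Bool.or_eq_true, decide_eq_true_eq, List.mem_cons,
    List.not_mem_nil, or_false, Prod.mk.injEq]
  constructor
  · rintro ⟨⟨h1, h2⟩, h3⟩
    rw [abs_lt] at h1 h2
    exact ⟨pvFst q - pvFst c, by omega, pvSnd q - pvSnd c, by omega, by omega, by omega, by omega⟩
  · rintro ⟨dx, hdx, dy, hdy, hne, h1, h2⟩
    refine ⟨⟨abs_lt.mpr (by omega), abs_lt.mpr (by omega)⟩, by omega⟩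

set_option maxHeartbeats 1000000 in
theorem pv_main (data_pts : List (List Int)) :
    compute_all_edges data_pts = compute_all_edges_alt data_pts := by
  have hApair : (compute_all_edges data_pts).Pairwise (· < ·) := by
    simp only [compute_all_edges, pvSortedLL]
    apply pv_uniqAdj_pairwise
    exact (PySem.List.sorted_pairwise _ _).imp (fun h => h)
  have hBnodup : (compute_all_edges_alt data_pts).Nodup := by
    simp only [compute_all_edges_alt, pvSortedLL]
    refine ((@PySem.List.sorted_perm (List Int) (List Int) List.instLinearOrder.toLT LinearOrder.toDecidableLT _ _ _).nodup_iff).mpr ?_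
    refine pv_nodup_foldl _ (fun s ip hs => ?_) _ _ (by simp [PySem.Set.empty])
    refine pv_nodup_foldl _ (fun s dx hs => ?_) _ _ hs
    refine pv_nodup_foldl _ (fun s dy hs => ?_) _ _ hs
    split_ifs with hc
    · exact pv_nodup_foldl _ (fun s j hs => PySem.Set.nodup_add _ _ hs) _ _ hs
    · exact hs
  have hBpair : (compute_all_edges_alt data_pts).Pairwise (· < ·) := by
    have hle : (compute_all_edges_alt data_pts).Pairwise (· ≤ ·) := by
      simp only [compute_all_edges_alt, pvSortedLL]
      exact (PySem.List.sorted_pairwise _ _).imp (fun h => h)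
    exact (hle.and hBnodup).imp (fun h => lt_of_le_of_ne h.1 h.2)
  apply pv_eq_of_pairwise_lt _ _ hApair hBpair
  intro x
  rw [pv_memA, pv_memB]
  constructor
  · rintro ⟨i, hi, q, hq, hnear, rfl⟩
    rcases (pv_near_iff _ q).mp hnear with ⟨dx, hdx, dy, hdy, hne, hkey⟩
    exact ⟨i, hi, dx, hdx, dy, hdy, hne, q, hq, hkey, rfl⟩
  · rintro ⟨i, hi, dx, hdx, dy, hdy, hne, q, hq, hkey, rfl⟩
    exact ⟨i, hi, q, hq, (pv_near_iff _ q).mpr ⟨dx, hdx, dy, hdy, hne, hkey⟩, rfl⟩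

-- ===== VERDICT (by name: the statement is the Claim_ definition above) =====
theorem compute_all_edges_spec : Claim_equal_compute_all_edges := by
  intro data_pts _ _
  unfold Spec_compute_all_edges
  exact pv_main data_pts
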